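-- pv_equiv track=rewrite | github.com/tiretfa/adventofcode2024 | src/day5.py | two_star
-- ===== SOURCE A (Python) =====
-- indexOf = lambda item, list_: list_.index(item) if item in list_ else -1
--
-- rules = []
--
-- updates = []
--
-- def two_star(rules, updates):
--     def correct_update(rules, update):
--         correct = False
--         while(not correct):
--             for r1, r2 in rules:
--                 if indexOf(r1, update) == -1 or indexOf(r2, update) == -1:
--                     continue
--                 elif (i1:=indexOf(r1, update)) > (i2:=indexOf(r2, update)):
--                     update[i1] = r2
--                     update[i2] = r1
--                     break
--             else:
--                 correct = True
--         return update[int(len(update)/2)]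
--
--     mid_pages = []
--     for update in updates:
--         for r1, r2 in rules:
--             if indexOf(r1, update) == -1 or indexOf(r2, update) == -1:
--                 continue
--             elif indexOf(r1, update) > indexOf(r2, update):
--                 mid_pages.append(correct_update(rules, update))
--                 break
--     return sum(mid_pages)
-- ===== SOURCE B (Python) =====
-- def two_star(rules, updates):
--     ruleset = set(rules)
--     total = 0
--     for u in updates:
--         pos = {}
--         for i, p in enumerate(u):
--             if p not in pos:
--                 pos[p] = i
--         if any(r1 in pos and r2 in pos and pos[r1] > pos[r2] for r1, r2 in rules):
--             rank = lambda p: sum((q, p) in ruleset for q in pos if q != p)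
--             total += sorted(u, key=rank)[len(u) // 2]
--     return total
-- ===== Notes on version B (the rewrite author's own statement) =====
-- stated objective: faster
-- what changed: B replaces A's repeated scan-rules-and-swap-until-fixpoint loop (with list.index rescans) by a single pass per update: a first-occurrence position dict for the violation test and a predecessor-count selection of the middle page from the rule set, never reordering the list.
-- outside the precondition, e.g. on two_star([(-1, 0), (131, 6), (0, 4)], [[4, 8, 0], [10, 0, 3]]): A returns 8, B returns 0; on two_star([(1, 2)], [[2, 1, 1, 2]]): A returns 1, B returns 2
import Mathlib
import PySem

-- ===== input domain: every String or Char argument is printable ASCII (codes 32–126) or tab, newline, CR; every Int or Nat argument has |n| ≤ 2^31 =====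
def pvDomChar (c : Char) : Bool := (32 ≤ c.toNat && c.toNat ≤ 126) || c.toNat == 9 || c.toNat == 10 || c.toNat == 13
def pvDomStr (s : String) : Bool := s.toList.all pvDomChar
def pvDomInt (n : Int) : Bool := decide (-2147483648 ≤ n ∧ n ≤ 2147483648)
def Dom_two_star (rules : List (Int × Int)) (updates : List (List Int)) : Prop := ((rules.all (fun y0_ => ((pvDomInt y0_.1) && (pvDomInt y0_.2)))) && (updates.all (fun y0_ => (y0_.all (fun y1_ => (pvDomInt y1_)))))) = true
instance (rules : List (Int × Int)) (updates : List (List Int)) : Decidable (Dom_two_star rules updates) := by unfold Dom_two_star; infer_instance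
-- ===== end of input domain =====

-- B replaces A's repeated swap-until-sorted loop by a predecessor-count selection of the middle
-- page (objective: faster). A mutates the inner update lists in place; B does not — the claim is
-- about the return value only.

-- ===== PORT A =====
-- indexOf = lambda item, list_: list_.index(item) if item in list_ else -1
def pvIndexOf (item : Int) (l : List Int) : Int :=
  match PySem.List.index? l item with
  | some i => (i : Int)
  | none => -1

-- the inner 'for r1, r2 in rules: … break / else' of both loops of A: first violated rule
def pvFindViol (rules : List (Int × Int)) (u : List Int) : Option (Int × Int) :=
  match rules with
  | [] => none
  | (r1, r2) :: rs =>
    if pvIndexOf r1 u == -1 || pvIndexOf r2 u == -1 then pvFindViol rs u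
    else if pvIndexOf r1 u > pvIndexOf r2 u then some (r1, r2)
    else pvFindViol rs u

-- inversion count: fuel for A's 'while not correct' loop (a totality guard only; each iteration
-- of the Python loop strictly decreases it on the admitted inputs, see the lemmas below)
def pvRuleMem (rules : List (Int × Int)) (y x : Int) : Bool := decide ((y, x) ∈ rules)

def pvInv (rules : List (Int × Int)) : List Int → Nat
  | [] => 0
  | x :: xs => xs.countP (fun y => pvRuleMem rules y x) + pvInv rules xs

-- the 'while not correct:' loop body: find first violated rule, swap the two pages
def pvBubble (rules : List (Int × Int)) : Nat → List Int → List Int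
  | 0, u => u
  | fuel + 1, u =>
    match pvFindViol rules u with
    | none => u
    | some (r1, r2) =>
      pvBubble rules fuel
        (PySem.List.pySetD (PySem.List.pySetD u (pvIndexOf r1 u) r2) (pvIndexOf r2 u) r1)

-- correct_update: loop to the fixpoint, then return update[int(len(update)/2)]
def pvCorrectUpdate (rules : List (Int × Int)) (u : List Int) : Int :=
  let v := pvBubble rules (pvInv rules u + 1) u
  PySem.List.pyGetD v ((v.length / 2 : Nat) : Int) 0

def two_star (rules : List (Int × Int)) (updates : List (List Int)) : Int :=
  let midPages := updates.foldl (fun acc u =>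
    match pvFindViol rules u with
    | some _ => acc ++ [pvCorrectUpdate rules u]
    | none => acc) []
  midPages.sum

-- ===== PORT B =====
-- pos = {}; for i, p in enumerate(u): if p not in pos: pos[p] = i
def pvPosFold (d : PySem.Dict Int Int) : List (Int × Int) → PySem.Dict Int Int
  | [] => d
  | (i, p) :: rest => pvPosFold (if d.contains p then d else d.insert p i) rest

def pvPosDict (u : List Int) : PySem.Dict Int Int :=
  pvPosFold PySem.Dict.empty (PySem.List.enumerate u)

-- any(r1 in pos and r2 in pos and pos[r1] > pos[r2] for r1, r2 in rules)
def pvViolatedB (rules : List (Int × Int)) (pos : PySem.Dict Int Int) : Bool :=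
  rules.any (fun r => pos.contains r.1 && pos.contains r.2 && pos.getD r.1 0 > pos.getD r.2 0)

-- sum((q, p) in ruleset for q in pos if q != p)
def pvPredCount (ruleset : PySem.Set (Int × Int)) (keys : List Int) (p : Int) : Nat :=
  (keys.filter (fun q => q != p)).countP (fun q => PySem.Set.contains ruleset (q, p))

-- sorted(u, key=rank)[len(u) // 2]
def pvMidB (ruleset : PySem.Set (Int × Int)) (keys : List Int) (u : List Int) : Int :=
  PySem.List.pyGetD (PySem.List.sorted u (fun p => pvPredCount ruleset keys p) false)
    ((u.length / 2 : Nat) : Int) 0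

def two_star_alt (rules : List (Int × Int)) (updates : List (List Int)) : Int :=
  let ruleset : PySem.Set (Int × Int) := PySem.Set.ofList rules
  updates.foldl (fun total u =>
    let pos := pvPosDict u
    if pvViolatedB rules pos then total + pvMidB ruleset pos.keys u else total) 0

-- ===== PRECONDITION & SPEC =====
-- Some rule is violated in u (both pages present, first occurrence of r1 after that of r2):
-- exactly the condition under which A enters its correction loop on u.
def pvHasViol (rules : List (Int × Int)) (u : List Int) : Bool :=
  rules.any (fun r =>
    match PySem.List.index? u r.1, PySem.List.index? u r.2 with
    | some i1, some i2 => decide (i2 < i1)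
    | _, _ => false)

-- Pre_ excludes inputs where some update that A would reorder has duplicate pages or pages the
-- rules do not totally order: there A's fixed point (hence its middle page) is an accident of
-- rule iteration order — A may loop forever or return any of several defensible middles, and
-- B's count-predecessors ordering is as defensible a choice as A's swap order.
def Pre_two_star (rules : List (Int × Int)) (updates : List (List Int)) : Prop :=
  ∀ u ∈ updates, pvHasViol rules u = true →
    u.Nodup ∧
    (∀ a ∈ u, ∀ b ∈ u, a ≠ b → ((a, b) ∈ rules ↔ (b, a) ∉ rules)) ∧
    (∀ a ∈ u, ∀ b ∈ u, ∀ c ∈ u, (a, b) ∈ rules → (b, c) ∈ rules → (a, c) ∈ rules)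

instance (rules : List (Int × Int)) (updates : List (List Int)) : Decidable (Pre_two_star rules updates) := by
  unfold Pre_two_star; infer_instance

def pvWitness_two_star : (List (Int × Int)) × List (List Int) := ([(1, 2)], [[2, 1]])

def Spec_two_star (rules : List (Int × Int)) (updates : List (List Int)) (out : Int) : Prop := out = two_star_alt rules updates
instance (rules : List (Int × Int)) (updates : List (List Int)) (out : Int) : Decidable (Spec_two_star rules updates out) := by unfold Spec_two_star; infer_instance

-- ===== CLAIM (what is proved, stated in full; the proofs are below) =====
def Claim_equal_two_star : Prop := ∀ (rules : List (Int × Int)) (updates : List (List Int)), Dom_two_star rules updates → Pre_two_star rules updates → Spec_two_star rules updates (two_star rules updates)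

-- ===== LEMMAS AND PROOFS =====

-- abbreviations for the hypotheses on one update
def pvTot (rules : List (Int × Int)) (u : List Int) : Prop :=
  ∀ a ∈ u, ∀ b ∈ u, a ≠ b → ((a, b) ∈ rules ↔ (b, a) ∉ rules)
def pvTrans (rules : List (Int × Int)) (u : List Int) : Prop :=
  ∀ a ∈ u, ∀ b ∈ u, ∀ c ∈ u, (a, b) ∈ rules → (b, c) ∈ rules → (a, c) ∈ rules

theorem pvIndexOf_some (u : List Int) (x : Int) (i : Nat) (h : PySem.List.index? u x = some i) :
    pvIndexOf x u = (i : Int) := by unfold pvIndexOf; rw [h]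

theorem pvIndexOf_isNone (u : List Int) (x : Int) :
    (pvIndexOf x u == -1) = (PySem.List.index? u x).isNone := by
  unfold pvIndexOf
  cases h : PySem.List.index? u x with
  | none => simp
  | some i =>
    simp only [Option.isNone_some]
    exact beq_eq_false_iff_ne.mpr (by omega)

theorem pvFindViol_eq_some (rules : List (Int × Int)) (u : List Int) (r : Int × Int)
    (h : pvFindViol rules u = some r) :
    r ∈ rules ∧ ∃ i1 i2, PySem.List.index? u r.1 = some i1 ∧
      PySem.List.index? u r.2 = some i2 ∧ i2 < i1 := by
  induction rules with
  | nil => simp [pvFindViol] at h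
  | cons p rs ih =>
    obtain ⟨r1, r2⟩ := p
    simp only [pvFindViol] at h
    by_cases h1 : (pvIndexOf r1 u == -1 || pvIndexOf r2 u == -1) = true
    · rw [if_pos h1] at h
      obtain ⟨hm, rest⟩ := ih h
      exact ⟨List.mem_cons_of_mem _ hm, rest⟩
    · rw [if_neg h1] at h
      rw [Bool.or_eq_true, not_or, pvIndexOf_isNone, pvIndexOf_isNone] at h1
      obtain ⟨hn1, hn2⟩ := h1
      cases hi1 : PySem.List.index? u r1 with
      | none => simp at hn1; exact absurd hn1 ((PySem.List.index?_eq_none_iff u r1).mp hi1)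
      | some i1 =>
      cases hi2 : PySem.List.index? u r2 with
      | none => simp at hn2; exact absurd hn2 ((PySem.List.index?_eq_none_iff u r2).mp hi2)
      | some i2 =>
      rw [pvIndexOf_some u r1 i1 hi1, pvIndexOf_some u r2 i2 hi2] at h
      by_cases hlt : ((i1 : Int) > (i2 : Int))
      · rw [if_pos hlt] at h
        cases h
        exact ⟨List.mem_cons_self, i1, i2, hi1, hi2, by exact_mod_cast hlt⟩
      · rw [if_neg hlt] at h
        obtain ⟨hm, rest⟩ := ih h
        exact ⟨List.mem_cons_of_mem _ hm, rest⟩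

theorem pvFindViol_eq_none (rules : List (Int × Int)) (u : List Int)
    (h : pvFindViol rules u = none) :
    ∀ p ∈ rules, ∀ i1 i2, PySem.List.index? u p.1 = some i1 →
      PySem.List.index? u p.2 = some i2 → i1 ≤ i2 := by
  induction rules with
  | nil => simp
  | cons p rs ih =>
    obtain ⟨r1, r2⟩ := p
    simp only [pvFindViol] at h
    intro q hq i1 i2 h1 h2
    rcases List.mem_cons.mp hq with rfl | hq'
    · simp only at h1 h2
      by_cases hb : (pvIndexOf r1 u == -1 || pvIndexOf r2 u == -1) = true
      · rw [Bool.or_eq_true, pvIndexOf_isNone, pvIndexOf_isNone, h1, h2] at hb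
        simp at hb
      · rw [if_neg hb] at h
        rw [pvIndexOf_some u r1 i1 h1, pvIndexOf_some u r2 i2 h2] at h
        by_cases hlt : ((i1 : Int) > (i2 : Int))
        · rw [if_pos hlt] at h; cases h
        · omega
    · by_cases hb : (pvIndexOf r1 u == -1 || pvIndexOf r2 u == -1) = true
      · rw [if_pos hb] at h; exact ih h q hq' i1 i2 h1 h2
      · rw [if_neg hb] at h
        by_cases hlt : (pvIndexOf r1 u > pvIndexOf r2 u)
        · rw [if_pos hlt] at h; cases h
        · rw [if_neg hlt] at h; exact ih h q hq' i1 i2 h1 h2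

theorem pvFindViol_isSome_eq (rules : List (Int × Int)) (u : List Int) :
    (pvFindViol rules u).isSome = pvHasViol rules u := by
  induction rules with
  | nil => simp [pvFindViol, pvHasViol]
  | cons p rs ih =>
    obtain ⟨r1, r2⟩ := p
    simp only [pvFindViol, pvHasViol, List.any_cons]
    cases h1 : PySem.List.index? u r1 with
    | none =>
      have : (pvIndexOf r1 u == -1) = true := by rw [pvIndexOf_isNone, h1]; rfl
      simp only [this, Bool.true_or, if_true]
      simpa [pvHasViol] using ih
    | some i1 =>
      cases h2 : PySem.List.index? u r2 with
      | none =>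
        have : (pvIndexOf r2 u == -1) = true := by rw [pvIndexOf_isNone, h2]; rfl
        simp only [this, Bool.or_true, if_true]
        simpa [pvHasViol] using ih
      | some i2 =>
        have e1 : (pvIndexOf r1 u == -1) = false := by rw [pvIndexOf_isNone, h1]; rfl
        have e2 : (pvIndexOf r2 u == -1) = false := by rw [pvIndexOf_isNone, h2]; rfl
        simp only [e1, e2, Bool.or_false, if_false]
        rw [pvIndexOf_some u r1 i1 h1, pvIndexOf_some u r2 i2 h2]
        by_cases hlt : ((i1 : Int) > (i2 : Int))
        · rw [if_pos hlt]
          have : decide (i2 < i1) = true := by simp; exact_mod_cast hlt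
          simp [this]
        · rw [if_neg hlt]
          have : decide (i2 < i1) = false := by simp; omega
          simp only [this, Bool.false_or]
          simpa [pvHasViol] using ih

theorem pvInv_lt_of_perm_append (rules : List (Int × Int)) (A t t' : List Int)
    (hp : t.Perm t') (h : pvInv rules t' < pvInv rules t) :
    pvInv rules (A ++ t') < pvInv rules (A ++ t) := by
  induction A with
  | nil => simpa using h
  | cons a A ih =>
    simp only [List.cons_append, pvInv, List.countP_append]
    have := hp.countP_eq (fun y => pvRuleMem rules y a)
    omega

theorem pvInv_append (rules : List (Int × Int)) (X Y : List Int) :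
    pvInv rules (X ++ Y) = pvInv rules X +
      (X.map (fun x => Y.countP (fun y => pvRuleMem rules y x))).sum + pvInv rules Y := by
  induction X with
  | nil => simp [pvInv]
  | cons x X ih =>
    simp only [List.cons_append, pvInv, List.countP_append, List.map_cons, List.sum_cons, ih]
    omega

theorem pvSumMapSplit (l : List Int) (p : Int → Bool) (g : Int → Nat) :
    (l.map (fun b => g b + (if p b then 1 else 0))).sum = (l.map g).sum + l.countP p := by
  induction l with
  | nil => simp
  | cons a l ih => simp [ih, List.countP_cons]; omega

theorem pvInv_swap_lt (rules : List (Int × Int)) (u : List Int) (B C : List Int) (r1 r2 : Int)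
    (htot : pvTot rules u) (htr : pvTrans rules u)
    (hmem : ∀ x ∈ r2 :: B ++ r1 :: C, x ∈ u) (hnd : (r2 :: B ++ r1 :: C).Nodup)
    (hr : (r1, r2) ∈ rules) :
    pvInv rules (r1 :: B ++ r2 :: C) < pvInv rules (r2 :: B ++ r1 :: C) := by
  have hr1u : r1 ∈ u := hmem r1 (by simp)
  have hr2u : r2 ∈ u := hmem r2 (by simp)
  have hBu : ∀ b ∈ B, b ∈ u := fun b hb => hmem b (by simp [hb])
  have hne : r1 ≠ r2 := by
    intro he
    apply (List.nodup_cons.mp hnd).1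
    rw [← he]
    simp
  have hx1 : pvRuleMem rules r1 r2 = true := decide_eq_true hr
  have hx2 : pvRuleMem rules r2 r1 = false := by
    have := (htot r1 hr1u r2 hr2u hne).mp hr
    simpa [pvRuleMem] using this
  have c1 : B.countP (fun y => pvRuleMem rules y r1) ≤ B.countP (fun y => pvRuleMem rules y r2) := by
    apply List.countP_mono_left
    intro b hb h
    have hb' : (b, r1) ∈ rules := of_decide_eq_true h
    exact decide_eq_true (htr b (hBu b hb) r1 hr1u r2 hr2u hb' hr)
  have c2 : B.countP (pvRuleMem rules r2) ≤ B.countP (pvRuleMem rules r1) := by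
    apply List.countP_mono_left
    intro b hb h
    have hb' : (r2, b) ∈ rules := of_decide_eq_true h
    exact decide_eq_true (htr r1 hr1u r2 hr2u b (hBu b hb) hr hb')
  have e1 : pvInv rules (r1 :: B ++ r2 :: C) =
      B.countP (fun y => pvRuleMem rules y r1) + C.countP (fun y => pvRuleMem rules y r1) +
      pvInv rules B + ((B.map (fun b => C.countP (fun y => pvRuleMem rules y b))).sum +
        B.countP (pvRuleMem rules r2)) +
      (C.countP (fun y => pvRuleMem rules y r2) + pvInv rules C) := by
    simp only [pvInv, List.countP_append, List.countP_cons, pvInv_append, List.map_cons,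
      List.sum_cons, hx1, hx2, Bool.false_eq_true, if_true, if_false]
    rw [pvSumMapSplit]
    omega
  have e2 : pvInv rules (r2 :: B ++ r1 :: C) =
      B.countP (fun y => pvRuleMem rules y r2) + C.countP (fun y => pvRuleMem rules y r2) + 1 +
      pvInv rules B + ((B.map (fun b => C.countP (fun y => pvRuleMem rules y b))).sum +
        B.countP (pvRuleMem rules r1)) +
      (C.countP (fun y => pvRuleMem rules y r1) + pvInv rules C) := by
    simp only [pvInv, List.countP_append, List.countP_cons, pvInv_append, List.map_cons,
      List.sum_cons, hx1, hx2, Bool.false_eq_true, if_true, if_false]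
    rw [pvSumMapSplit]
    omega
  omega

theorem pvSet_append (P S : List Int) (x y : Int) :
    (P ++ x :: S).set P.length y = P ++ y :: S := by
  induction P with
  | nil => rfl
  | cons p P ih => simpa using ih

theorem pvIndex?_split (x : Int) :
    ∀ (P t : List Int) (k : Nat), PySem.List.index? (P ++ t) x = some k → P.length ≤ k →
      PySem.List.index? t x = some (k - P.length) := by
  intro P
  induction P with
  | nil => intro t k h _; simpa using h
  | cons p P ih =>
    intro t k h hk
    simp only [List.cons_append] at h
    simp only [List.length_cons] at hk ⊢
    by_cases hpx : p = x
    · subst hpx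
      rw [PySem.List.index?_cons_self] at h
      cases h
      omega
    · rw [PySem.List.index?_cons_of_ne _ hpx] at h
      cases hidx : PySem.List.index? (P ++ t) x with
      | none => rw [hidx] at h; simp at h
      | some k' =>
        rw [hidx] at h
        simp only [Option.map_some, Option.some.injEq] at h
        rw [ih t k' hidx (by omega)]
        congr 1
        omega

-- one step of the loop: decomposition and the new list
theorem pvStep (rules : List (Int × Int)) (v : List Int) (r1 r2 : Int)
    (h : pvFindViol rules v = some (r1, r2)) :
    ∃ A B C, v = A ++ r2 :: B ++ r1 :: C ∧
      PySem.List.pySetD (PySem.List.pySetD v (pvIndexOf r1 v) r2) (pvIndexOf r2 v) r1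
        = A ++ r1 :: B ++ r2 :: C ∧ (r1, r2) ∈ rules := by
  obtain ⟨hrm, i1, i2, hi1, hi2, hlt⟩ := pvFindViol_eq_some rules v (r1, r2) h
  simp only at hi1 hi2
  obtain ⟨A, S, hvA, hAl, hnA⟩ := (PySem.List.index?_eq_some_iff v r2 i2).mp hi2
  have hS : PySem.List.index? S r1 = some (i1 - (i2 + 1)) := by
    have : PySem.List.index? ((A ++ [r2]) ++ S) r1 = some i1 := by
      rw [List.append_assoc]; simpa using hvA ▸ hi1
    have := pvIndex?_split r1 (A ++ [r2]) S i1 this (by simp; omega)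
    simpa [hAl] using this
  obtain ⟨B, C, hSB, hBl, hnB⟩ := (PySem.List.index?_eq_some_iff S r1 (i1 - (i2 + 1))).mp hS
  refine ⟨A, B, C, by rw [hvA, hSB]; simp, ?_, hrm⟩
  rw [pvIndexOf_some v r1 i1 hi1, pvIndexOf_some v r2 i2 hi2]
  rw [PySem.List.pySetD_natCast, PySem.List.pySetD_natCast]
  have h1 : v = (A ++ r2 :: B) ++ r1 :: C := by rw [hvA, hSB]; simp
  have hl1 : (A ++ r2 :: B).length = i1 := by simp [hAl, hBl]; omega
  rw [h1, ← hl1, pvSet_append]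
  have h2 : (A ++ r2 :: B) ++ r2 :: C = A ++ r2 :: (B ++ r2 :: C) := by simp
  rw [h2, ← hAl, pvSet_append]
  simp

theorem pvSwap_perm (B C : List Int) (r1 r2 : Int) :
    ((r2 :: B) ++ (r1 :: C)).Perm ((r1 :: B) ++ (r2 :: C)) := by
  simp only [List.cons_append]
  refine (List.perm_middle.cons r2).trans ?_
  refine (List.Perm.swap r1 r2 (B ++ C)).trans ?_
  exact (List.perm_middle.symm.cons r1)

theorem pvBubble_reaches (rules : List (Int × Int)) (u : List Int)
    (hnd : u.Nodup) (htot : pvTot rules u) (htr : pvTrans rules u) :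
    ∀ (n : Nat) (v : List Int), pvInv rules v ≤ n → v.Perm u →
      (pvBubble rules (n + 1) v).Perm u ∧ pvFindViol rules (pvBubble rules (n + 1) v) = none := by
  intro n
  induction n using Nat.strong_induction_on with
  | _ n ih =>
    intro v hinv hperm
    cases hfv : pvFindViol rules v with
    | none => constructor <;> simp [pvBubble, hfv, hperm]
    | some r =>
      obtain ⟨r1, r2⟩ := r
      have hndv : v.Nodup := (hperm.nodup_iff).mpr hnd
      obtain ⟨A, B, C, hv, hset, hrmem⟩ := pvStep rules v r1 r2 hfv
      have hv' : v = A ++ ((r2 :: B) ++ (r1 :: C)) := by rw [hv, List.append_assoc]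
      have hndv' : (A ++ ((r2 :: B) ++ (r1 :: C))).Nodup := hv' ▸ hndv
      have htail_nd : ((r2 :: B) ++ (r1 :: C)).Nodup := hndv'.of_append_right
      have htail_mem : ∀ x ∈ (r2 :: B) ++ (r1 :: C), x ∈ u := fun x hx =>
        hperm.mem_iff.mp (by rw [hv']; exact List.mem_append_right _ hx)
      have hswap := pvInv_swap_lt rules u B C r1 r2 htot htr htail_mem htail_nd hrmem
      have hlt : pvInv rules (A ++ r1 :: B ++ r2 :: C) < pvInv rules v := by
        rw [hv]
        simp only [List.append_assoc]
        exact pvInv_lt_of_perm_append rules A _ _ (pvSwap_perm B C r1 r2) hswap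
      have hvu : (A ++ r2 :: B ++ r1 :: C).Perm u := hv ▸ hperm
      have hperm' : (A ++ r1 :: B ++ r2 :: C).Perm u := by
        refine List.Perm.trans ?_ hvu
        simp only [List.append_assoc]
        exact List.Perm.append_left A (pvSwap_perm B C r1 r2).symm
      cases n with
      | zero => omega
      | succ m =>
        have hstep : pvBubble rules (m + 1 + 1) v = pvBubble rules (m + 1) (A ++ r1 :: B ++ r2 :: C) := by
          simp [pvBubble, hfv, hset]
        rw [hstep]
        exact ih m (by omega) _ (by omega) hperm'

theorem pvIndex?_getElem (v : List Int) (hnd : v.Nodup) (i : Nat) (hi : i < v.length) :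
    PySem.List.index? v v[i] = some i := by
  rw [PySem.List.index?_eq_idxOf?]
  rw [List.idxOf?_eq_some_iff]
  refine ⟨hi, rfl, ?_⟩
  intro j hj hje
  have := (List.Nodup.getElem_inj_iff hnd).mp hje
  omega

theorem pvSorted_of_fix (rules : List (Int × Int)) (v : List Int)
    (hnd : v.Nodup) (h : pvFindViol rules v = none) :
    v.Pairwise (fun a b => (b, a) ∉ rules) := by
  rw [List.pairwise_iff_getElem]
  intro i j hi hj hij hmem
  have h1 := pvIndex?_getElem v hnd j hj
  have h2 := pvIndex?_getElem v hnd i hi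
  have := pvFindViol_eq_none rules v h (v[j], v[i]) hmem j i h1 h2
  omega

theorem pvRank_sorted (rules : List (Int × Int)) (u : List Int) (htot : pvTot rules u) :
    ∀ (v : List Int), v.Pairwise (fun a b => (b, a) ∉ rules) → v.Nodup → (∀ x ∈ v, x ∈ u) →
      ∀ (pre post : List Int) (e : Int), v = pre ++ e :: post →
        v.countP (fun q => q != e && decide ((q, e) ∈ rules)) = pre.length := by
  intro v
  induction v with
  | nil =>
    intro _ _ _ pre post e hsplit
    simp at hsplit
  | cons x xs ih =>
    intro hpw hnd hmem pre post e hsplit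
    obtain ⟨hhead, hpw'⟩ := List.pairwise_cons.mp hpw
    obtain ⟨hx, hnd'⟩ := List.nodup_cons.mp hnd
    have hmem' : ∀ y ∈ xs, y ∈ u := fun y hy => hmem y (List.mem_cons_of_mem _ hy)
    cases pre with
    | nil =>
      simp only [List.nil_append, List.cons.injEq] at hsplit
      obtain ⟨rfl, rfl⟩ := hsplit
      rw [List.countP_cons]
      have hcz : xs.countP (fun q => q != x && decide ((q, x) ∈ rules)) = 0 := by
        apply List.countP_eq_zero.mpr
        intro q hq
        simp only [Bool.and_eq_true, bne_iff_ne, decide_eq_true_eq, not_and]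
        intro _
        exact hhead q hq
      rw [hcz]
      simp
    | cons y pre' =>
      simp only [List.cons_append, List.cons.injEq] at hsplit
      obtain ⟨rfl, hxs⟩ := hsplit
      have he : e ∈ xs := by rw [hxs]; exact List.mem_append_right _ List.mem_cons_self
      have hxne : x ≠ e := fun he' => hx (he' ▸ he)
      have hrx : (x, e) ∈ rules := by
        have h1 : (e, x) ∉ rules := hhead _ he
        exact (htot x (hmem x List.mem_cons_self) e (hmem' _ he) hxne).mpr h1
      have hih := ih hpw' hnd' hmem' pre' post e hxs
      rw [List.countP_cons, hih]
      have : (x != e && decide ((x, e) ∈ rules)) = true := by simp [hxne, hrx]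
      rw [this]
      simp

theorem pvSetContains (rules : List (Int × Int)) (z : Int × Int) :
    PySem.Set.contains (PySem.Set.ofList rules) z = decide (z ∈ rules) := by
  simp [PySem.Set.contains, PySem.Set.mem_ofList]

theorem pvPosFold_get? (x : Int) :
    ∀ (l : List Int) (s : Int) (d : PySem.Dict Int Int),
      (pvPosFold d (PySem.List.enumerate l s)).get? x =
        ((d.get? x).or ((PySem.List.index? l x).map (fun n => s + (n : Int)))) := by
  intro l
  induction l with
  | nil => intro s d; simp [PySem.List.enumerate_nil, pvPosFold]
  | cons p l ih =>
    intro s d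
    rw [PySem.List.enumerate_cons]
    show (pvPosFold (if d.contains p then d else d.insert p s) (PySem.List.enumerate l (s + 1))).get? x = _
    rw [ih]
    by_cases hc : d.contains p = true
    · rw [if_pos hc]
      by_cases hxp : x = p
      · subst hxp
        have hs : (d.get? x).isSome = true := by
          rw [← PySem.Dict.contains_eq_isSome_get?]; exact hc
        obtain ⟨w, hw⟩ := Option.isSome_iff_exists.mp hs
        simp [hw]
      · rw [PySem.List.index?_cons_of_ne _ (fun h => hxp h.symm)]
        cases hix : PySem.List.index? l x <;> cases hdx : d.get? x <;>
          simp [Option.or] <;> omega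
    · rw [if_neg hc]
      have hdn : d.get? p = none := by
        have := PySem.Dict.contains_eq_isSome_get? d p
        rw [eq_false_of_ne_true hc] at this
        exact Option.not_isSome_iff_eq_none.mp (by rw [← this]; simp)
      by_cases hxp : x = p
      · subst hxp
        rw [PySem.List.index?_cons_self]
        have : (d.insert x s).get? x = some s := by
          rw [PySem.Dict.get?_insert]; simp
        simp [this, hdn, Option.or]
      · have : (d.insert p s).get? x = d.get? x := by
          rw [PySem.Dict.get?_insert]; simp [hxp]
        rw [this, PySem.List.index?_cons_of_ne _ (fun h => hxp h.symm)]
        cases hix : PySem.List.index? l x <;> cases hdx : d.get? x <;>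
          simp [Option.or] <;> omega

theorem pvPosDict_get? (u : List Int) (x : Int) :
    (pvPosDict u).get? x = (PySem.List.index? u x).map (fun n => (n : Int)) := by
  unfold pvPosDict
  rw [pvPosFold_get? x u 0 PySem.Dict.empty]
  simp [PySem.Dict.get?_empty, Option.or]

theorem pvPosFold_keys_nodup :
    ∀ (E : List (Int × Int)) (d : PySem.Dict Int Int), d.keys.Nodup → (pvPosFold d E).keys.Nodup := by
  intro E
  induction E with
  | nil => intro d h; exact h
  | cons ip E ih =>
    obtain ⟨i, p⟩ := ip
    intro d h
    show (pvPosFold (if d.contains p then d else d.insert p i) E).keys.Nodup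
    by_cases hc : d.contains p = true
    · rw [if_pos hc]; exact ih d h
    · rw [if_neg hc]
      apply ih
      rw [PySem.Dict.keys_insert_of_not_contains d i (eq_false_of_ne_true hc)]
      apply List.Nodup.append h (List.nodup_singleton p)
      intro a ha hb
      rw [List.mem_singleton] at hb
      subst hb
      exact hc (((PySem.Dict.contains_iff_mem_keys d a).mpr ha))

theorem pvPosFold_keys_mem (x : Int) :
    ∀ (E : List (Int × Int)) (d : PySem.Dict Int Int),
      (x ∈ (pvPosFold d E).keys ↔ x ∈ d.keys ∨ x ∈ E.map (·.2)) := by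
  intro E
  induction E with
  | nil => intro d; simp [pvPosFold]
  | cons ip E ih =>
    obtain ⟨i, p⟩ := ip
    intro d
    show x ∈ (pvPosFold (if d.contains p then d else d.insert p i) E).keys ↔ _
    by_cases hc : d.contains p = true
    · rw [if_pos hc, ih]
      simp only [List.map_cons, List.mem_cons]
      constructor
      · rintro (h | h)
        · exact Or.inl h
        · exact Or.inr (Or.inr h)
      · rintro (h | h | h)
        · exact Or.inl h
        · exact Or.inl (h ▸ (PySem.Dict.contains_iff_mem_keys d p).mp hc)
        · exact Or.inr h
    · rw [if_neg hc, ih]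
      rw [PySem.Dict.keys_insert_of_not_contains d i (eq_false_of_ne_true hc)]
      simp only [List.mem_append, List.mem_singleton, List.map_cons, List.mem_cons]
      tauto

theorem pvPosDict_keys_mem (u : List Int) (x : Int) : x ∈ (pvPosDict u).keys ↔ x ∈ u := by
  unfold pvPosDict
  rw [pvPosFold_keys_mem x (PySem.List.enumerate u) PySem.Dict.empty]
  rw [PySem.List.map_snd_enumerate]
  simp [PySem.Dict.keys_empty]

theorem pvPosDict_keys_nodup (u : List Int) : (pvPosDict u).keys.Nodup := by
  apply pvPosFold_keys_nodup
  simp [PySem.Dict.keys_empty]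

theorem pvGuard_eq (rules : List (Int × Int)) (u : List Int) :
    pvViolatedB rules (pvPosDict u) = pvHasViol rules u := by
  unfold pvViolatedB pvHasViol
  apply PySem.List.any_congr_mem
  intro r _
  have h1 := pvPosDict_get? u r.1
  have h2 := pvPosDict_get? u r.2
  have hc1 := PySem.Dict.contains_eq_isSome_get? (pvPosDict u) r.1
  have hc2 := PySem.Dict.contains_eq_isSome_get? (pvPosDict u) r.2
  have hg1 := PySem.Dict.getD_eq_get?_getD (pvPosDict u) r.1 (0 : Int)
  have hg2 := PySem.Dict.getD_eq_get?_getD (pvPosDict u) r.2 (0 : Int)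
  cases hi1 : PySem.List.index? u r.1 with
  | none => rw [hi1] at h1; simp [hc1, h1]
  | some i1 =>
    cases hi2 : PySem.List.index? u r.2 with
    | none => rw [hi2] at h2; simp [hc2, h2]
    | some i2 =>
      rw [hi1] at h1; rw [hi2] at h2
      rw [hc1, hc2, hg1, hg2, h1, h2]
      have hiff : ((i1 : Int) > (i2 : Int)) ↔ (i2 < i1) := by omega
      simp [hiff]

-- rank of p counted as B counts it, for p ∈ u
theorem pvPredCount_eq (rules : List (Int × Int)) (u : List Int) (hnd : u.Nodup) (p : Int) :
    pvPredCount (PySem.Set.ofList rules) (pvPosDict u).keys p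
      = u.countP (fun q => q != p && decide ((q, p) ∈ rules)) := by
  unfold pvPredCount
  rw [List.countP_filter]
  have hperm : ((pvPosDict u).keys).Perm u :=
    (List.perm_ext_iff_of_nodup (pvPosDict_keys_nodup u) hnd).mpr (pvPosDict_keys_mem u)
  rw [hperm.countP_eq]
  apply List.countP_congr
  intro q _
  rw [pvSetContains]
  rw [Bool.and_comm]

-- the per-update main lemma
theorem pvMain (rules : List (Int × Int)) (u : List Int)
    (hv : pvHasViol rules u = true) (hnd : u.Nodup)
    (htot : pvTot rules u) (htr : pvTrans rules u) :
    pvCorrectUpdate rules u = pvMidB (PySem.Set.ofList rules) (pvPosDict u).keys u := by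
  obtain ⟨hperm, hfix⟩ :=
    pvBubble_reaches rules u hnd htot htr (pvInv rules u) u le_rfl (List.Perm.refl u)
  set v := pvBubble rules (pvInv rules u + 1) u with hvdef
  have hlen : v.length = u.length := hperm.length_eq
  have hune : 0 < u.length := by
    rcases List.any_eq_true.mp hv with ⟨r, hr, hcond⟩
    cases hi1 : PySem.List.index? u r.1 with
    | none => rw [hi1] at hcond; cases hi2 : PySem.List.index? u r.2 <;> rw [hi2] at hcond <;> simp at hcond
    | some i1 =>
      have : r.1 ∈ u := (PySem.List.index?_isSome_iff u r.1).mp (by rw [hi1]; rfl)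
      exact List.length_pos_of_mem this
  have hm : u.length / 2 < v.length := by
    rw [hlen]; exact Nat.div_lt_self hune one_lt_two
  have hndv : v.Nodup := hperm.nodup_iff.mpr hnd
  have hsorted := pvSorted_of_fix rules v hndv hfix
  have hmemv : ∀ x ∈ v, x ∈ u := fun x hx => hperm.mem_iff.mp hx
  -- A's value is v[u.length / 2]
  have hA : pvCorrectUpdate rules u = v[u.length / 2] := by
    unfold pvCorrectUpdate
    rw [← hvdef]
    rw [PySem.List.pyGetD_natCast]
    rw [hlen]
    exact List.getD_eq_getElem v 0 hm
  -- each element's predecessor count in u is its position in v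
  have hrank : ∀ (pre post : List Int) (e : Int), v = pre ++ e :: post →
      u.countP (fun q => q != e && decide ((q, e) ∈ rules)) = pre.length := by
    intro pre post e hsplit
    rw [hperm.symm.countP_eq]
    exact pvRank_sorted rules u htot v hsorted hndv hmemv pre post e hsplit
  -- each position's element has predecessor count equal to its index
  have hrankAt : ∀ k (hk : k < v.length),
      u.countP (fun q => q != v[k] && decide ((q, v[k]) ∈ rules)) = k := by
    intro k hk
    have hdec : v = v.take k ++ v[k] :: v.drop (k + 1) := by
      conv_lhs => rw [← List.take_append_drop k v]
      congr 1
      exact List.drop_eq_getElem_cons hk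
    have := hrank _ _ _ hdec
    rwa [List.length_take, Nat.min_eq_left (le_of_lt hk)] at this
  have hkey : ∀ k (hk : k < v.length),
      pvPredCount (PySem.Set.ofList rules) (pvPosDict u).keys v[k] = k := by
    intro k hk
    rw [pvPredCount_eq rules u hnd, hrankAt k hk]
  have hpair : v.Pairwise (fun a b =>
      pvPredCount (PySem.Set.ofList rules) (pvPosDict u).keys a <
      pvPredCount (PySem.Set.ofList rules) (pvPosDict u).keys b) := by
    rw [List.pairwise_iff_getElem]
    intro i j hi hj hij
    rw [hkey i hi, hkey j hj]
    exact hij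
  have hsortedv :
      PySem.List.sorted u (fun p => pvPredCount (PySem.Set.ofList rules) (pvPosDict u).keys p) = v :=
    PySem.List.sorted_eq_of_perm_of_pairwise_lt u v _ hperm hpair
  unfold pvMidB
  rw [hsortedv, hA, PySem.List.pyGetD_natCast]
  exact (List.getD_eq_getElem v 0 hm).symm

-- the whole fold
theorem pvFold_eq (rules : List (Int × Int)) :
    ∀ (us : List (List Int)) (acc : List Int) (t : Int),
      (∀ u ∈ us, pvHasViol rules u = true → u.Nodup ∧ pvTot rules u ∧ pvTrans rules u) →
      acc.sum = t →
      (us.foldl (fun acc u =>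
        match pvFindViol rules u with
        | some _ => acc ++ [pvCorrectUpdate rules u]
        | none => acc) acc).sum
      = us.foldl (fun total u =>
          let pos := pvPosDict u
          if pvViolatedB rules pos then total + pvMidB (PySem.Set.ofList rules) pos.keys u
          else total) t := by
  intro us
  induction us with
  | nil => intro acc t _ h; simpa using h
  | cons u us ih =>
    intro acc t hpre hsum
    simp only [List.foldl_cons]
    cases hfv : pvFindViol rules u with
    | none =>
      have hg : pvViolatedB rules (pvPosDict u) = false := by
        rw [pvGuard_eq, ← pvFindViol_isSome_eq, hfv]; rfl
      simp only [hg, Bool.false_eq_true, if_false]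
      exact ih acc t (fun w hw => hpre w (List.mem_cons_of_mem _ hw)) hsum
    | some r =>
      have hg : pvViolatedB rules (pvPosDict u) = true := by
        rw [pvGuard_eq, ← pvFindViol_isSome_eq, hfv]; rfl
      have hviol : pvHasViol rules u = true := by
        rw [← pvFindViol_isSome_eq, hfv]; rfl
      simp only [hg, if_true]
      obtain ⟨h1, h2, h3⟩ := hpre u List.mem_cons_self hviol
      apply ih _ _ (fun w hw => hpre w (List.mem_cons_of_mem _ hw))
      rw [List.sum_append, hsum, List.sum_singleton, pvMain rules u hviol h1 h2 h3]

-- ===== VERDICT (by name: the statement is the Claim_ definition above) =====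
theorem two_star_spec : Claim_equal_two_star := by
  intro rules updates _ hpre
  unfold Spec_two_star two_star two_star_alt
  apply pvFold_eq rules updates [] 0 ?_ rfl
  intro u hu hviol
  exact hpre u hu hviol
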